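-- pv_equiv track=rewrite | github.com/mcuelenaere/advent_of_code | advent_of_code/year2020/day11/shared.py | find_stable_state
-- ===== SOURCE A (Python) =====
-- from typing import Set, Tuple
--
-- Seat = Tuple[int, int]
--
-- DIRECTIONS = (
--     # north
--     (0, 1),
--     # north-east
--     (1, 1),
--     # east
--     (1, 0),
--     # south-east
--     (1, -1),
--     # south
--     (0, -1),
--     # south-west
--     (-1, -1),
--     # west
--     (-1, 0),
--     # north-west
--     (-1, 1),
-- )
--
-- def count_adjacent_seats(seat: Seat, available_seats: Set[Seat], occupied_seats: Set[Seat], max_position: Seat, enable_line_of_sight: bool):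
--     count = 0
--     for d_x, d_y in DIRECTIONS:
--         if enable_line_of_sight:
--             i = 1
--             while True:
--                 x = seat[0] + d_x * i
--                 y = seat[1] + d_y * i
--                 if x < 0 or y < 0:
--                     break
--                 elif x > max_position[0] or y > max_position[1]:
--                     break
--
--                 if (x, y) in available_seats:
--                     # an available seat is blocking our view
--                     break
--                 elif (x, y) in occupied_seats:
--                     # found an occupied seat
--                     count += 1
--                     break
--
--                 i += 1
--         else:
--             x = seat[0] + d_x
--             y = seat[1] + d_y
--             count += 1 if (x, y) in occupied_seats else 0
--
--     return count
--
-- def find_stable_state(seats: Set[Seat], max_position: Seat, enable_line_of_sight: bool, required_seat_count: int) -> Tuple[Set[Seat], Set[Seat]]: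
--     available_seats = seats.copy()
--     occupied_seats = set()
--
--     while True:
--         # perform a round
--         old_available_seats = available_seats.copy()
--         old_occupied_seats = occupied_seats.copy()
--         for seat in seats:
--             count = count_adjacent_seats(seat, old_available_seats, old_occupied_seats, max_position, enable_line_of_sight)
--             if seat not in old_occupied_seats and count == 0:
--                 # seat becomes occupied
--                 occupied_seats.add(seat)
--                 available_seats.remove(seat)
--             elif seat in old_occupied_seats and count >= required_seat_count:
--                 # seat becomes available
--                 occupied_seats.remove(seat)
--                 available_seats.add(seat)
--
--         if len(occupied_seats) == len(old_occupied_seats):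
--             # we reached a stable state
--             break
--
--     return available_seats, occupied_seats
-- ===== SOURCE B (Python) =====
-- # B: build each seat's static (line-of-sight) neighbor list once, then run rounds with
-- # per-round set algebra over that graph instead of A's per-round directional grid rescans.
-- DIRECTIONS = (
--     (0, 1), (1, 1), (1, 0), (1, -1), (0, -1), (-1, -1), (-1, 0), (-1, 1),
-- )
--
-- def find_stable_state(seats, max_position, enable_line_of_sight, required_seat_count):
--     seats = set(seats)
--     max_x, max_y = max_position
--
--     def first_seat(seat, d_x, d_y):
--         x, y = seat[0] + d_x, seat[1] + d_y
--         while 0 <= x <= max_x and 0 <= y <= max_y: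
--             if (x, y) in seats:
--                 return (x, y)
--             x += d_x
--             y += d_y
--         return None
--
--     if enable_line_of_sight:
--         neighbors = {s: [n for n in (first_seat(s, dx, dy) for dx, dy in DIRECTIONS)
--                          if n is not None] for s in seats}
--     else:
--         neighbors = {s: [(s[0] + dx, s[1] + dy) for dx, dy in DIRECTIONS
--                          if (s[0] + dx, s[1] + dy) in seats] for s in seats}
--
--     available, occupied = set(seats), set()
--     while True:
--         newly = {s for s in seats if s not in occupied
--                  and sum(n in occupied for n in neighbors[s]) == 0}
--         vacated = {s for s in seats if s in occupied
--                    and sum(n in occupied for n in neighbors[s]) >= required_seat_count}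
--         new_occupied = (occupied - vacated) | newly
--         new_available = (available - newly) | vacated
--         if len(new_occupied) == len(occupied):
--             return new_available, new_occupied
--         available, occupied = new_available, new_occupied
-- ===== Notes on version B (the rewrite author's own statement) =====
-- stated objective: alternative
-- what changed: B precomputes each seat's static (line-of-sight) neighbor list once and then runs each round as set algebra (newly-occupied / vacated comprehensions over the precomputed neighbor counts), instead of A's per-round directional grid rescans with interleaved mutation of the two sets; the stopping rule (occupied-count unchanged) is the same, so B returns and diverges exactly where A does.
import Mathlib
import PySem

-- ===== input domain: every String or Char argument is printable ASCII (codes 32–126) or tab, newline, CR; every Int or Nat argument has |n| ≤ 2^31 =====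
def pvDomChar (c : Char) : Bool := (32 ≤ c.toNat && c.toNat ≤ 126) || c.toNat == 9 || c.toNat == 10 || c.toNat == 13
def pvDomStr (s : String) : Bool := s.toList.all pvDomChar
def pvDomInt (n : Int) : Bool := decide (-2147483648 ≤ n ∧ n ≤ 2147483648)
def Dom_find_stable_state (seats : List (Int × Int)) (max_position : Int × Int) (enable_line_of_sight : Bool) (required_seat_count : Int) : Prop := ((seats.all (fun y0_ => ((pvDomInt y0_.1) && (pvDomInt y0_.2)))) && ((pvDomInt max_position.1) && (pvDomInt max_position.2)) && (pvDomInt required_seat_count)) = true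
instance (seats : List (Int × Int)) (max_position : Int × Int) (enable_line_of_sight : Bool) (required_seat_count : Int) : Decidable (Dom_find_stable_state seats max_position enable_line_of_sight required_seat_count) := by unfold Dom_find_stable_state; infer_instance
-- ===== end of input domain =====

-- B builds each seat's static (line-of-sight) neighbor list once and runs rounds with
-- per-round set algebra over that graph, instead of A's per-round directional grid rescans
-- (objective: alternative; return-value equivalence only — the Python functions take sets).

-- ===== PORT A =====
def pvDirections : List (Int × Int) :=
  [(0, 1), (1, 1), (1, 0), (1, -1), (0, -1), (-1, -1), (-1, 0), (-1, 1)]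

-- fuel bound for the inner while-loop: positions stay inside [0,max] on a moving
-- coordinate, so at most max.1+max.2+2 iterations ever run; the fuel-0 branch is unreachable
def pvFuelW (maxp : Int × Int) : Nat := maxp.1.toNat + maxp.2.toNat + 2

-- the `while True` scan of count_adjacent_seats (x,y advance by d each step, matching seat + d*i)
def pvLosA (fuel : Nat) (x y dx dy : Int) (maxp : Int × Int)
    (avail occ : List (Int × Int)) : Int :=
  match fuel with
  | 0 => 0
  | Nat.succ fuel =>
    if x < 0 ∨ y < 0 then 0
    else if x > maxp.1 ∨ y > maxp.2 then 0
    else if PySem.Set.contains avail (x, y) then 0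
    else if PySem.Set.contains occ (x, y) then 1
    else pvLosA fuel (x + dx) (y + dy) dx dy maxp avail occ

def pvCountAdjA (seat : Int × Int) (avail occ : List (Int × Int)) (maxp : Int × Int)
    (los : Bool) : Int :=
  pvDirections.foldl (fun count d =>
    if los then
      count + pvLosA (pvFuelW maxp) (seat.1 + d.1, seat.2 + d.2).1 (seat.1 + d.1, seat.2 + d.2).2 d.1 d.2 maxp avail occ
    else
      count + (if PySem.Set.contains occ (seat.1 + d.1, seat.2 + d.2) then 1 else 0)) 0

-- one round of A's while-loop body (counts read the old copies; set.remove never raises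
-- here because the two sets always partition the seats, so it is Set.discard)
def pvRoundA (s0 oldAvail oldOcc : List (Int × Int)) (maxp : Int × Int) (los : Bool)
    (req : Int) : List (Int × Int) × List (Int × Int) :=
  s0.foldl (fun st seat =>
    let c := pvCountAdjA seat oldAvail oldOcc maxp los
    if ¬ PySem.Set.contains oldOcc seat = true ∧ c = 0 then
      (PySem.Set.discard st.1 seat, PySem.Set.add st.2 seat)
    else if PySem.Set.contains oldOcc seat = true ∧ req ≤ c then
      (PySem.Set.add st.1 seat, PySem.Set.discard st.2 seat)
    else st) (oldAvail, oldOcc)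

-- A's outer `while True` as fuel recursion; the deterministic round map revisits a state
-- (and hence repeats or stops) within 2^|seats| rounds, so this fuel is never exhausted
-- on an input where the Python loop stops; the fuel-0 branch returns the running state
def pvLoopA (fuel : Nat) (s0 avail occ : List (Int × Int)) (maxp : Int × Int)
    (los : Bool) (req : Int) : List (Int × Int) × List (Int × Int) :=
  match fuel with
  | 0 => (avail, occ)
  | Nat.succ fuel =>
    let st := pvRoundA s0 avail occ maxp los req
    if PySem.List.len st.2 = PySem.List.len occ then st
    else pvLoopA fuel s0 st.1 st.2 maxp los req

def find_stable_state (seats : List (Int × Int)) (max_position : Int × Int) (enable_line_of_sight : Bool) (required_seat_count : Int) : (List (Int × Int)) × (List (Int × Int)) :=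
  let s0 := PySem.Set.ofList seats
  pvLoopA (2 ^ s0.length + 2) s0 s0 [] max_position enable_line_of_sight required_seat_count

-- ===== PORT B =====
-- B's first_seat walk: first seat along direction d inside the box, if any
def pvLosB (fuel : Nat) (x y dx dy : Int) (maxp : Int × Int)
    (s0 : List (Int × Int)) : Option (Int × Int) :=
  match fuel with
  | 0 => none
  | Nat.succ fuel =>
    if 0 ≤ x ∧ x ≤ maxp.1 ∧ 0 ≤ y ∧ y ≤ maxp.2 then
      if PySem.Set.contains s0 (x, y) then some (x, y)
      else pvLosB fuel (x + dx) (y + dy) dx dy maxp s0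
    else none

def pvNbrsOf (s0 : List (Int × Int)) (maxp : Int × Int) (los : Bool)
    (s : Int × Int) : List (Int × Int) :=
  if los then
    (pvDirections.map (fun d =>
      pvLosB (pvFuelW maxp) (s.1 + d.1) (s.2 + d.2) d.1 d.2 maxp s0)).filterMap id
  else
    pvDirections.filterMap (fun d =>
      if PySem.Set.contains s0 (s.1 + d.1, s.2 + d.2) then
        some (s.1 + d.1, s.2 + d.2)
      else none)

-- sum(n in occupied for n in neighbors[s])
def pvCountB (nbrs : PySem.Dict (Int × Int) (List (Int × Int)))
    (occ : List (Int × Int)) (s : Int × Int) : Int :=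
  ((PySem.Dict.getD nbrs s []).countP (fun n => PySem.Set.contains occ n) : Int)

-- {s for s in seats if s not in occupied and count == 0}
def pvNewlyB (s0 : List (Int × Int)) (nbrs : PySem.Dict (Int × Int) (List (Int × Int)))
    (occ : List (Int × Int)) : List (Int × Int) :=
  s0.foldl (fun acc s =>
    if ¬ PySem.Set.contains occ s = true ∧ pvCountB nbrs occ s = 0 then
      PySem.Set.add acc s else acc) PySem.Set.empty

-- {s for s in seats if s in occupied and count >= required_seat_count}
def pvVacatedB (s0 : List (Int × Int)) (nbrs : PySem.Dict (Int × Int) (List (Int × Int)))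
    (occ : List (Int × Int)) (req : Int) : List (Int × Int) :=
  s0.foldl (fun acc s =>
    if PySem.Set.contains occ s = true ∧ req ≤ pvCountB nbrs occ s then
      PySem.Set.add acc s else acc) PySem.Set.empty

-- B's `while True`; same fuel as A's loop, same stopping rule
def pvLoopB (fuel : Nat) (s0 : List (Int × Int))
    (nbrs : PySem.Dict (Int × Int) (List (Int × Int))) (avail occ : List (Int × Int))
    (req : Int) : List (Int × Int) × List (Int × Int) :=
  match fuel with
  | 0 => (avail, occ)
  | Nat.succ fuel =>
    let newly := pvNewlyB s0 nbrs occ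
    let vacated := pvVacatedB s0 nbrs occ req
    let newOcc := PySem.Set.union (PySem.Set.diff occ vacated) newly
    let newAvail := PySem.Set.union (PySem.Set.diff avail newly) vacated
    if PySem.List.len newOcc = PySem.List.len occ then (newAvail, newOcc)
    else pvLoopB fuel s0 nbrs newAvail newOcc req

def find_stable_state_alt (seats : List (Int × Int)) (max_position : Int × Int) (enable_line_of_sight : Bool) (required_seat_count : Int) : (List (Int × Int)) × (List (Int × Int)) :=
  let s0 := PySem.Set.ofList seats
  let nbrs : PySem.Dict (Int × Int) (List (Int × Int)) :=
    ⟨s0.map (fun s => (s, pvNbrsOf s0 max_position enable_line_of_sight s))⟩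
  pvLoopB (2 ^ s0.length + 2) s0 nbrs s0 [] required_seat_count

-- ===== PRECONDITION & SPEC =====
-- (no Pre_: both ports are total and agree on every input; where the Python loop never
-- stops — e.g. four mutually adjacent seats with required 2 — neither Python returns,
-- and the two ports still return equal values)
def Spec_find_stable_state (seats : List (Int × Int)) (max_position : Int × Int) (enable_line_of_sight : Bool) (required_seat_count : Int) (out : (List (Int × Int)) × (List (Int × Int))) : Prop := out = find_stable_state_alt seats max_position enable_line_of_sight required_seat_count
instance (seats : List (Int × Int)) (max_position : Int × Int) (enable_line_of_sight : Bool) (required_seat_count : Int) (out : (List (Int × Int)) × (List (Int × Int))) : Decidable (Spec_find_stable_state seats max_position enable_line_of_sight required_seat_count out) := by unfold Spec_find_stable_state; infer_instance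

-- ===== CLAIM (what is proved, stated in full; the proofs are below) =====
def Claim_equal_find_stable_state : Prop := ∀ (seats : List (Int × Int)) (max_position : Int × Int) (enable_line_of_sight : Bool) (required_seat_count : Int), Dom_find_stable_state seats max_position enable_line_of_sight required_seat_count → Spec_find_stable_state seats max_position enable_line_of_sight required_seat_count (find_stable_state seats max_position enable_line_of_sight required_seat_count)

-- ===== LEMMAS AND PROOFS =====
-- (the equality of the two ports holds round for round on every input, so the proofs
-- below never need Pre_; Pre_ only delimits where the Python loop returns at all)

-- proof-side abbreviations: the (boolean) branch predicates of a round, given the old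
-- occupied set: pvPb = "becomes occupied", pvQb = "becomes available"
def pvPb (nbrs : PySem.Dict (Int × Int) (List (Int × Int))) (occ : List (Int × Int))
    (s : Int × Int) : Bool :=
  !PySem.Set.contains occ s && decide (pvCountB nbrs occ s = 0)

def pvQb (nbrs : PySem.Dict (Int × Int) (List (Int × Int))) (occ : List (Int × Int))
    (req : Int) (s : Int × Int) : Bool :=
  PySem.Set.contains occ s && decide (req ≤ pvCountB nbrs occ s)

lemma pvPb_iff (nbrs : PySem.Dict (Int × Int) (List (Int × Int))) (occ : List (Int × Int))
    (s : Int × Int) :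
    pvPb nbrs occ s = true ↔ (¬ PySem.Set.contains occ s = true ∧ pvCountB nbrs occ s = 0) := by
  simp [pvPb]

lemma pvQb_iff (nbrs : PySem.Dict (Int × Int) (List (Int × Int))) (occ : List (Int × Int))
    (req : Int) (s : Int × Int) :
    pvQb nbrs occ req s = true ↔ (PySem.Set.contains occ s = true ∧ req ≤ pvCountB nbrs occ s) := by
  simp [pvQb]

-- the canonical result of one round, to which both ports' rounds are reduced
def pvNewAvail (s0 : List (Int × Int)) (nbrs : PySem.Dict (Int × Int) (List (Int × Int)))
    (avail occ : List (Int × Int)) (req : Int) : List (Int × Int) :=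
  avail.filter (fun t => !(pvPb nbrs occ t && s0.contains t)) ++
    s0.filter (fun t => pvQb nbrs occ req t)

def pvNewOcc (s0 : List (Int × Int)) (nbrs : PySem.Dict (Int × Int) (List (Int × Int)))
    (occ : List (Int × Int)) (req : Int) : List (Int × Int) :=
  occ.filter (fun t => !(pvQb nbrs occ req t && s0.contains t)) ++
    s0.filter (fun t => pvPb nbrs occ t)

lemma pvLoopA_succ (fuel : Nat) (s0 avail occ : List (Int × Int)) (maxp : Int × Int)
    (los : Bool) (req : Int) :
    pvLoopA (fuel + 1) s0 avail occ maxp los req =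
      (let st := pvRoundA s0 avail occ maxp los req
       if PySem.List.len st.2 = PySem.List.len occ then st
       else pvLoopA fuel s0 st.1 st.2 maxp los req) := rfl

lemma pvLoopB_succ (fuel : Nat) (s0 : List (Int × Int))
    (nbrs : PySem.Dict (Int × Int) (List (Int × Int))) (avail occ : List (Int × Int))
    (req : Int) :
    pvLoopB (fuel + 1) s0 nbrs avail occ req =
      (let newly := pvNewlyB s0 nbrs occ
       let vacated := pvVacatedB s0 nbrs occ req
       let newOcc := PySem.Set.union (PySem.Set.diff occ vacated) newly
       let newAvail := PySem.Set.union (PySem.Set.diff avail newly) vacated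
       if PySem.List.len newOcc = PySem.List.len occ then (newAvail, newOcc)
       else pvLoopB fuel s0 nbrs newAvail newOcc req) := rfl

-- the dict built by mapping over the seat list looks up to the mapped value
lemma pv_getD_map {ν : Type} (l : List (Int × Int)) (f : (Int × Int) → ν) (dflt : ν)
    (s : Int × Int) (hs : s ∈ l) :
    PySem.Dict.getD ⟨l.map (fun t => (t, f t))⟩ s dflt = f s := by
  induction l with
  | nil => cases hs
  | cons a t ih =>
    by_cases h : a = s
    · subst h; simp [PySem.Dict.getD, PySem.Dict.get?]
    · rcases List.mem_cons.mp hs with h' | h'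
      · exact absurd h'.symm h
      · simpa [PySem.Dict.getD, PySem.Dict.get?, h] using ih h'

-- A's directional scan over the partitioned sets equals the indicator of B's first-seat
-- scan landing on an occupied seat
lemma pv_losAB (s0 avail occ : List (Int × Int))
    (hAv : ∀ t, t ∈ avail ↔ (t ∈ s0 ∧ t ∉ occ)) (hOcc : ∀ x ∈ occ, x ∈ s0)
    (maxp : Int × Int) (dx dy : Int) :
    ∀ (fuel : Nat) (x y : Int),
      pvLosA fuel x y dx dy maxp avail occ =
        (match pvLosB fuel x y dx dy maxp s0 with
         | some t => if t ∈ occ then 1 else 0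
         | none => 0) := by
  intro fuel
  induction fuel with
  | zero => intro x y; rfl
  | succ fuel ih =>
    intro x y
    by_cases hbox : 0 ≤ x ∧ x ≤ maxp.1 ∧ 0 ≤ y ∧ y ≤ maxp.2
    · have h1 : ¬ (x < 0 ∨ y < 0) := by omega
      have h2 : ¬ (x > maxp.1 ∨ y > maxp.2) := by omega
      by_cases hs : (x, y) ∈ s0
      · by_cases ho : (x, y) ∈ occ
        · have hav : ¬ ((x, y) ∈ avail) := fun h => ((hAv (x, y)).mp h).2 ho
          simp [pvLosA, pvLosB, hbox, h1, h2, PySem.Set.contains,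
            List.contains_iff_mem, hs, ho, hav]
        · have hav : (x, y) ∈ avail := (hAv (x, y)).mpr ⟨hs, ho⟩
          simp [pvLosA, pvLosB, hbox, h1, h2, PySem.Set.contains,
            List.contains_iff_mem, hs, ho, hav]
      · have ho : ¬ ((x, y) ∈ occ) := fun h => hs (hOcc _ h)
        have hcs0 : PySem.Set.contains s0 (x, y) = false := by
          simp [PySem.Set.contains, List.contains_iff_mem, hs]
        have hco : PySem.Set.contains occ (x, y) = false := by
          simp [PySem.Set.contains, List.contains_iff_mem, ho]
        have hcav : PySem.Set.contains avail (x, y) = false := by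
          simp only [PySem.Set.contains, List.contains_iff_mem]
          simp [hAv (x, y), hs]
        simp only [pvLosA, pvLosB, hcs0, hco, hcav, Bool.false_eq_true, if_false,
          if_neg h1, if_neg h2, if_pos hbox]
        exact ih (x + dx) (y + dy)
    · have h12 : (x < 0 ∨ y < 0) ∨ (x > maxp.1 ∨ y > maxp.2) := by omega
      rcases h12 with h | h
      · simp [pvLosA, pvLosB, hbox, h]
      · have h1 : (x < 0 ∨ y < 0) ∨ ¬ (x < 0 ∨ y < 0) := em _
        rcases h1 with h1 | h1
        · simp [pvLosA, pvLosB, hbox, h1]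
        · simp [pvLosA, pvLosB, hbox, h1, h]

-- generic: a fold adding per-direction indicators is the countP of the filterMapped hits
lemma pv_fold_count (Af : (Int × Int) → Int) (g : (Int × Int) → Option (Int × Int))
    (p : (Int × Int) → Bool)
    (h : ∀ d, Af d = (match g d with | some t => if p t then (1 : Int) else 0 | none => 0)) :
    ∀ (dirs : List (Int × Int)) (c : Int),
      dirs.foldl (fun c d => c + Af d) c = c + ((dirs.filterMap g).countP p : Int) := by
  intro dirs
  induction dirs with
  | nil => intro c; simp
  | cons d rest ih =>
    intro c
    rw [List.foldl_cons, ih (c + Af d), List.filterMap_cons]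
    cases hg : g d with
    | none => rw [h d, hg]; push_cast; ring
    | some t =>
      rw [h d, hg, List.countP_cons]
      by_cases hp : p t = true <;> simp [hp] <;> push_cast <;> ring

-- A's count of a seat equals B's count through the precomputed neighbor dict
lemma pv_countAB (s0 avail occ : List (Int × Int)) (maxp : Int × Int) (los : Bool)
    (s : Int × Int) (hs : s ∈ s0)
    (hAv : ∀ t, t ∈ avail ↔ (t ∈ s0 ∧ t ∉ occ)) (hOcc : ∀ x ∈ occ, x ∈ s0) :
    pvCountAdjA s avail occ maxp los =
      pvCountB ⟨s0.map (fun t => (t, pvNbrsOf s0 maxp los t))⟩ occ s := by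
  unfold pvCountB
  rw [pv_getD_map s0 _ [] s hs]
  unfold pvCountAdjA pvNbrsOf
  cases los with
  | true =>
    simp only [if_true, List.filterMap_map, Function.id_comp]
    rw [pv_fold_count
      (fun d => pvLosA (pvFuelW maxp) (s.1 + d.1) (s.2 + d.2) d.1 d.2 maxp avail occ)
      (fun d => pvLosB (pvFuelW maxp) (s.1 + d.1) (s.2 + d.2) d.1 d.2 maxp s0)
      (fun n => PySem.Set.contains occ n) ?_ pvDirections 0]
    · simp
    · intro d
      dsimp only
      rw [pv_losAB s0 avail occ hAv hOcc maxp d.1 d.2 (pvFuelW maxp)]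
      rcases pvLosB (pvFuelW maxp) (s.1 + d.1) (s.2 + d.2) d.1 d.2 maxp s0 with _ | t
      · rfl
      · simp [PySem.Set.contains, List.contains_iff_mem]
  | false =>
    simp only [Bool.false_eq_true, if_false]
    rw [pv_fold_count
      (fun d => if PySem.Set.contains occ (s.1 + d.1, s.2 + d.2) then (1 : Int) else 0)
      (fun d => if PySem.Set.contains s0 (s.1 + d.1, s.2 + d.2)
        then some (s.1 + d.1, s.2 + d.2) else none)
      (fun n => PySem.Set.contains occ n) ?_ pvDirections 0]
    · simp
    · intro d
      dsimp only
      by_cases hc : (s.1 + d.1, s.2 + d.2) ∈ s0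
      · simp [PySem.Set.contains, List.contains_iff_mem, hc]
      · have hno : (s.1 + d.1, s.2 + d.2) ∉ occ := fun hmem => hc (hOcc _ hmem)
        simp [PySem.Set.contains, List.contains_iff_mem, hc, hno]

-- folding Set.add over a Nodup list disjoint from acc appends it
lemma pv_foldl_add (l acc : List (Int × Int)) (hl : l.Nodup)
    (hd : ∀ x ∈ l, x ∉ acc) : l.foldl PySem.Set.add acc = acc ++ l := by
  induction l generalizing acc with
  | nil => simp
  | cons a t ih =>
    simp only [List.nodup_cons] at hl
    have hna : a ∉ acc := hd a (by simp)
    have ha : PySem.Set.add acc a = acc ++ [a] := by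
      simp [PySem.Set.add, PySem.Set.contains, hna]
    simp only [List.foldl, ha]
    have hrec := ih (acc ++ [a]) hl.2 (by
      intro x hx
      simp only [List.mem_append, List.mem_singleton]
      rintro (h | rfl)
      · exact hd x (by simp [hx]) h
      · exact hl.1 hx)
    rw [hrec]
    simp

-- guarded Set.add fold = append the filtered elements
lemma pv_foldl_add_filter (q : (Int × Int) → Bool) :
    ∀ (l acc : List (Int × Int)), l.Nodup → (∀ x ∈ l, q x = true → x ∉ acc) →
      l.foldl (fun a s => if q s then PySem.Set.add a s else a) acc =
        acc ++ l.filter q := by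
  intro l
  induction l with
  | nil => intro acc _ _; simp
  | cons a t ih =>
    intro acc hnd hdisj
    simp only [List.nodup_cons] at hnd
    rw [List.foldl_cons, List.filter_cons]
    by_cases hq : q a = true
    · have hna : a ∉ acc := hdisj a (by simp) hq
      have ha : PySem.Set.add acc a = acc ++ [a] := by
        simp [PySem.Set.add, PySem.Set.contains, hna]
      rw [if_pos hq, ha, ih (acc ++ [a]) hnd.2 ?_]
      · simp [hq]
      · intro x hx hqx
        simp only [List.mem_append, List.mem_singleton]
        rintro (h | rfl)
        · exact hdisj x (by simp [hx]) hqx h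
        · exact hnd.1 hx
    · rw [if_neg hq, ih acc hnd.2 (fun x hx hqx => hdisj x (by simp [hx]) hqx)]
      simp [hq]

-- core of a round: A's interleaved discard/add fold over the seats produces the
-- filter-and-append normal forms of both components at once
lemma pv_round_core (P Q : (Int × Int) → Bool) :
    ∀ (l av oc : List (Int × Int)), l.Nodup → av.Nodup → oc.Nodup →
      (∀ s ∈ l, P s = true → s ∈ av ∧ s ∉ oc) → (∀ s ∈ l, Q s = true → s ∈ oc ∧ s ∉ av) →
      l.foldl (fun st s =>
          if P s then (PySem.Set.discard st.1 s, PySem.Set.add st.2 s)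
          else if Q s then (PySem.Set.add st.1 s, PySem.Set.discard st.2 s)
          else st) (av, oc)
        = (av.filter (fun x => !(P x && l.contains x)) ++ l.filter (fun x => Q x),
           oc.filter (fun x => !(Q x && l.contains x)) ++ l.filter (fun x => P x)) := by
  intro l
  induction l with
  | nil => intro av oc _ _ _ _ _; simp
  | cons a rest ih =>
    intro av oc hndl hndav hndoc hP hQ
    simp only [List.nodup_cons] at hndl
    rw [List.foldl_cons]
    by_cases hPa : P a = true
    · obtain ⟨hav, hoc⟩ := hP a (by simp) hPa
      have hQa : Q a = false :=
        Bool.eq_false_iff.mpr (fun hq => (hQ a (by simp) hq).2 hav)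
      have hstep : (if P a then (PySem.Set.discard av a, PySem.Set.add oc a)
          else if Q a then (PySem.Set.add av a, PySem.Set.discard oc a)
          else (av, oc)) = (PySem.Set.discard av a, oc ++ [a]) := by
        rw [if_pos hPa]
        simp [PySem.Set.add, PySem.Set.contains, hoc]
      rw [hstep,
        ih (PySem.Set.discard av a) (oc ++ [a]) hndl.2 (List.Nodup.filter _ hndav)
          (by rw [List.nodup_append]
              refine ⟨hndoc, List.nodup_singleton a, ?_⟩
              intro x hx b hb
              rw [List.mem_singleton] at hb
              subst hb
              rintro rfl
              exact hoc hx)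
          (by intro s hs hPs
              obtain ⟨h1, h2⟩ := hP s (by simp [hs]) hPs
              have hne : s ≠ a := fun he => hndl.1 (he ▸ hs)
              refine ⟨?_, ?_⟩
              · simp [PySem.Set.discard, List.mem_filter, h1, hne]
              · simp [h2, hne])
          (by intro s hs hQs
              obtain ⟨h1, h2⟩ := hQ s (by simp [hs]) hQs
              refine ⟨by simp [h1], ?_⟩
              simp [PySem.Set.discard, List.mem_filter, h2]),
        Prod.mk.injEq]
      refine ⟨?_, ?_⟩
      · rw [List.filter_cons_of_neg (by simp [hQa])]
        congr 1
        simp only [PySem.Set.discard, List.filter_filter]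
        apply List.filter_congr
        intro x _
        by_cases hxa : x = a
        · subst hxa; simp [hPa]
        · simp [hxa]
      · rw [List.filter_cons_of_pos (by simp [hPa]), List.filter_append]
        have h2 : List.filter (fun x => !(Q x && rest.contains x)) oc
            = List.filter (fun x => !(Q x && (a :: rest).contains x)) oc := by
          apply List.filter_congr
          intro x hx
          have hxa : x ≠ a := fun he => hoc (he ▸ hx)
          simp [hxa]
        have h3 : List.filter (fun x => !(Q x && rest.contains x)) [a] = [a] := by
          simp [hQa]
        rw [h2, h3, List.append_assoc, List.singleton_append]
    · by_cases hQa : Q a = true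
      · obtain ⟨hoc, hav⟩ := hQ a (by simp) hQa
        have hstep : (if P a then (PySem.Set.discard av a, PySem.Set.add oc a)
            else if Q a then (PySem.Set.add av a, PySem.Set.discard oc a)
            else (av, oc)) = (av ++ [a], PySem.Set.discard oc a) := by
          rw [if_neg hPa, if_pos hQa]
          simp [PySem.Set.add, PySem.Set.contains, hav]
        rw [hstep,
          ih (av ++ [a]) (PySem.Set.discard oc a) hndl.2
            (by rw [List.nodup_append]
                refine ⟨hndav, List.nodup_singleton a, ?_⟩
                intro x hx b hb
                rw [List.mem_singleton] at hb
                subst hb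
                rintro rfl
                exact hav hx)
            (List.Nodup.filter _ hndoc)
            (by intro s hs hPs
                obtain ⟨h1, h2⟩ := hP s (by simp [hs]) hPs
                refine ⟨by simp [h1], ?_⟩
                simp [PySem.Set.discard, List.mem_filter, h2])
            (by intro s hs hQs
                obtain ⟨h1, h2⟩ := hQ s (by simp [hs]) hQs
                have hne : s ≠ a := fun he => hndl.1 (he ▸ hs)
                refine ⟨?_, ?_⟩
                · simp [PySem.Set.discard, List.mem_filter, h1, hne]
                · simp [h2, hne]),
          Prod.mk.injEq]
        refine ⟨?_, ?_⟩
        · rw [List.filter_cons_of_pos (by simp [hQa]), List.filter_append]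
          have h2 : List.filter (fun x => !(P x && rest.contains x)) av
              = List.filter (fun x => !(P x && (a :: rest).contains x)) av := by
            apply List.filter_congr
            intro x hx
            have hxa : x ≠ a := fun he => hav (he ▸ hx)
            simp [hxa]
          have h3 : List.filter (fun x => !(P x && rest.contains x)) [a] = [a] := by
            simp [hPa]
          rw [h2, h3, List.append_assoc, List.singleton_append]
        · rw [List.filter_cons_of_neg (by simp [hPa])]
          congr 1
          simp only [PySem.Set.discard, List.filter_filter]
          apply List.filter_congr
          intro x _
          by_cases hxa : x = a
          · subst hxa; simp [hQa]
          · simp [hxa]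
      · have hstep : (if P a then (PySem.Set.discard av a, PySem.Set.add oc a)
            else if Q a then (PySem.Set.add av a, PySem.Set.discard oc a)
            else (av, oc)) = (av, oc) := by
          rw [if_neg hPa, if_neg hQa]
        rw [hstep,
          ih av oc hndl.2 hndav hndoc
            (fun s hs hPs => hP s (by simp [hs]) hPs)
            (fun s hs hQs => hQ s (by simp [hs]) hQs),
          Prod.mk.injEq]
        refine ⟨?_, ?_⟩
        · rw [List.filter_cons_of_neg (by simp [hQa])]
          congr 1
          apply List.filter_congr
          intro x _
          by_cases hxa : x = a
          · subst hxa; simp [hPa]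
          · simp [hxa]
        · rw [List.filter_cons_of_neg (by simp [hPa])]
          congr 1
          apply List.filter_congr
          intro x _
          by_cases hxa : x = a
          · subst hxa; simp [hQa]
          · simp [hxa]

-- A's round, under the loop invariants, in normal form
lemma pv_roundA_eq (s0 avail occ : List (Int × Int)) (maxp : Int × Int) (los : Bool)
    (req : Int) (hnd0 : s0.Nodup) (hndav : avail.Nodup) (hndoc : occ.Nodup)
    (hAv : ∀ t, t ∈ avail ↔ (t ∈ s0 ∧ t ∉ occ)) (hOcc : ∀ x ∈ occ, x ∈ s0) :
    pvRoundA s0 avail occ maxp los req =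
      (pvNewAvail s0 ⟨s0.map (fun t => (t, pvNbrsOf s0 maxp los t))⟩ avail occ req,
       pvNewOcc s0 ⟨s0.map (fun t => (t, pvNbrsOf s0 maxp los t))⟩ occ req) := by
  have hcore := pv_round_core
      (pvPb ⟨s0.map (fun t => (t, pvNbrsOf s0 maxp los t))⟩ occ)
      (pvQb ⟨s0.map (fun t => (t, pvNbrsOf s0 maxp los t))⟩ occ req) s0 avail occ
      hnd0 hndav hndoc
      (by intro s hs hPs
          obtain ⟨h1, h2⟩ := (pvPb_iff _ occ s).mp hPs
          have hno : s ∉ occ := by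
            simpa [PySem.Set.contains, List.contains_iff_mem] using h1
          exact ⟨(hAv s).mpr ⟨hs, hno⟩, hno⟩)
      (by intro s hs hQs
          obtain ⟨h1, h2⟩ := (pvQb_iff _ occ req s).mp hQs
          have ho : s ∈ occ := by
            simpa [PySem.Set.contains, List.contains_iff_mem] using h1
          exact ⟨ho, fun hin => ((hAv s).mp hin).2 ho⟩)
  unfold pvRoundA pvNewAvail pvNewOcc
  rw [← hcore]
  apply PySem.List.foldl_congr_mem
  intro st x hx
  dsimp only
  rw [pv_countAB s0 avail occ maxp los x hx hAv hOcc]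
  by_cases h1 : ¬ PySem.Set.contains occ x = true ∧
      pvCountB ⟨s0.map (fun t => (t, pvNbrsOf s0 maxp los t))⟩ occ x = 0
  · rw [if_pos h1, if_pos ((pvPb_iff _ occ x).mpr h1)]
  · rw [if_neg h1, if_neg (fun hb => h1 ((pvPb_iff _ occ x).mp hb))]
    by_cases h2 : PySem.Set.contains occ x = true ∧
        req ≤ pvCountB ⟨s0.map (fun t => (t, pvNbrsOf s0 maxp los t))⟩ occ x
    · rw [if_pos h2, if_pos ((pvQb_iff _ occ req x).mpr h2)]
    · rw [if_neg h2, if_neg (fun hb => h2 ((pvQb_iff _ occ req x).mp hb))]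

-- B's comprehension folds are the filters by the branch predicates
lemma pv_newlyB_eq (s0 occ : List (Int × Int))
    (nbrs : PySem.Dict (Int × Int) (List (Int × Int))) (hnd0 : s0.Nodup) :
    pvNewlyB s0 nbrs occ = s0.filter (fun s => pvPb nbrs occ s) := by
  unfold pvNewlyB
  rw [PySem.List.foldl_congr_mem s0
    (fun acc s => if ¬ PySem.Set.contains occ s = true ∧ pvCountB nbrs occ s = 0 then
      PySem.Set.add acc s else acc)
    (fun acc s => if pvPb nbrs occ s then PySem.Set.add acc s else acc)
    PySem.Set.empty
    (by intro acc x _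
        dsimp only
        by_cases h1 : ¬ PySem.Set.contains occ x = true ∧ pvCountB nbrs occ x = 0
        · rw [if_pos h1, if_pos ((pvPb_iff nbrs occ x).mpr h1)]
        · rw [if_neg h1, if_neg (fun hb => h1 ((pvPb_iff nbrs occ x).mp hb))]),
    pv_foldl_add_filter (fun s => pvPb nbrs occ s) s0 PySem.Set.empty hnd0
      (by intro x _ _; simp [PySem.Set.empty])]
  simp [PySem.Set.empty]

lemma pv_vacatedB_eq (s0 occ : List (Int × Int))
    (nbrs : PySem.Dict (Int × Int) (List (Int × Int))) (req : Int) (hnd0 : s0.Nodup) :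
    pvVacatedB s0 nbrs occ req = s0.filter (fun s => pvQb nbrs occ req s) := by
  unfold pvVacatedB
  rw [PySem.List.foldl_congr_mem s0
    (fun acc s => if PySem.Set.contains occ s = true ∧ req ≤ pvCountB nbrs occ s then
      PySem.Set.add acc s else acc)
    (fun acc s => if pvQb nbrs occ req s then PySem.Set.add acc s else acc)
    PySem.Set.empty
    (by intro acc x _
        dsimp only
        by_cases h1 : PySem.Set.contains occ x = true ∧ req ≤ pvCountB nbrs occ x
        · rw [if_pos h1, if_pos ((pvQb_iff nbrs occ req x).mpr h1)]
        · rw [if_neg h1, if_neg (fun hb => h1 ((pvQb_iff nbrs occ req x).mp hb))]),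
    pv_foldl_add_filter (fun s => pvQb nbrs occ req s) s0 PySem.Set.empty hnd0
      (by intro x _ _; simp [PySem.Set.empty])]
  simp [PySem.Set.empty]

-- membership facts about the branch predicates
lemma pv_pb_not_mem (nbrs : PySem.Dict (Int × Int) (List (Int × Int)))
    (occ : List (Int × Int)) (s : Int × Int) (h : pvPb nbrs occ s = true) : s ∉ occ := by
  have := ((pvPb_iff nbrs occ s).mp h).1
  simpa [PySem.Set.contains, List.contains_iff_mem] using this

lemma pv_qb_mem (nbrs : PySem.Dict (Int × Int) (List (Int × Int)))
    (occ : List (Int × Int)) (req : Int) (s : Int × Int)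
    (h : pvQb nbrs occ req s = true) : s ∈ occ := by
  have := ((pvQb_iff nbrs occ req s).mp h).1
  simpa [PySem.Set.contains, List.contains_iff_mem] using this

-- B's round (set algebra over the precomputed graph) in the same normal form
lemma pv_roundB_occ (s0 occ : List (Int × Int))
    (nbrs : PySem.Dict (Int × Int) (List (Int × Int))) (req : Int)
    (hnd0 : s0.Nodup) :
    PySem.Set.union (PySem.Set.diff occ (pvVacatedB s0 nbrs occ req)) (pvNewlyB s0 nbrs occ)
      = pvNewOcc s0 nbrs occ req := by
  rw [pv_newlyB_eq s0 occ nbrs hnd0, pv_vacatedB_eq s0 occ nbrs req hnd0]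
  unfold pvNewOcc
  have hdiff : PySem.Set.diff occ (s0.filter (fun s => pvQb nbrs occ req s)) =
      occ.filter (fun t => !(pvQb nbrs occ req t && s0.contains t)) := by
    unfold PySem.Set.diff
    apply List.filter_congr
    intro x _
    by_cases h1 : x ∈ s0 <;> by_cases h2 : pvQb nbrs occ req x = true <;>
      simp [List.contains_iff_mem, List.mem_filter, h1, h2]
  rw [hdiff]
  unfold PySem.Set.union PySem.Set.update
  apply pv_foldl_add
  · exact List.Nodup.filter _ hnd0
  · intro x hx hmem
    have hP : pvPb nbrs occ x = true := (List.mem_filter.mp hx).2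
    exact pv_pb_not_mem nbrs occ x hP (List.mem_filter.mp hmem).1

lemma pv_roundB_avail (s0 avail occ : List (Int × Int))
    (nbrs : PySem.Dict (Int × Int) (List (Int × Int))) (req : Int)
    (hnd0 : s0.Nodup) (hAv : ∀ t, t ∈ avail ↔ (t ∈ s0 ∧ t ∉ occ)) :
    PySem.Set.union (PySem.Set.diff avail (pvNewlyB s0 nbrs occ)) (pvVacatedB s0 nbrs occ req)
      = pvNewAvail s0 nbrs avail occ req := by
  rw [pv_newlyB_eq s0 occ nbrs hnd0, pv_vacatedB_eq s0 occ nbrs req hnd0]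
  unfold pvNewAvail
  have hdiff : PySem.Set.diff avail (s0.filter (fun s => pvPb nbrs occ s)) =
      avail.filter (fun t => !(pvPb nbrs occ t && s0.contains t)) := by
    unfold PySem.Set.diff
    apply List.filter_congr
    intro x _
    by_cases h1 : x ∈ s0 <;> by_cases h2 : pvPb nbrs occ x = true <;>
      simp [List.contains_iff_mem, List.mem_filter, h1, h2]
  rw [hdiff]
  unfold PySem.Set.union PySem.Set.update
  apply pv_foldl_add
  · exact List.Nodup.filter _ hnd0
  · intro x hx hmem
    have hQ : pvQb nbrs occ req x = true := (List.mem_filter.mp hx).2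
    have ho : x ∈ occ := pv_qb_mem nbrs occ req x hQ
    have hin : x ∈ avail := (List.mem_filter.mp hmem).1
    exact ((hAv x).mp hin).2 ho

-- the loop invariants survive a round
lemma pv_newOcc_nodup (s0 occ : List (Int × Int))
    (nbrs : PySem.Dict (Int × Int) (List (Int × Int))) (req : Int)
    (hnd0 : s0.Nodup) (hndoc : occ.Nodup) : (pvNewOcc s0 nbrs occ req).Nodup := by
  unfold pvNewOcc
  rw [List.nodup_append]
  refine ⟨List.Nodup.filter _ hndoc, List.Nodup.filter _ hnd0, ?_⟩
  intro x hx y hy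
  rintro rfl
  have hP : pvPb nbrs occ x = true := (List.mem_filter.mp hy).2
  exact pv_pb_not_mem nbrs occ x hP (List.mem_filter.mp hx).1

lemma pv_newOcc_sub (s0 occ : List (Int × Int))
    (nbrs : PySem.Dict (Int × Int) (List (Int × Int))) (req : Int)
    (hOcc : ∀ x ∈ occ, x ∈ s0) : ∀ x ∈ pvNewOcc s0 nbrs occ req, x ∈ s0 := by
  intro x hx
  unfold pvNewOcc at hx
  rcases List.mem_append.mp hx with h | h
  · exact hOcc x (List.mem_filter.mp h).1
  · exact (List.mem_filter.mp h).1

lemma pv_newAvail_nodup (s0 avail occ : List (Int × Int))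
    (nbrs : PySem.Dict (Int × Int) (List (Int × Int))) (req : Int)
    (hnd0 : s0.Nodup) (hndav : avail.Nodup)
    (hAv : ∀ t, t ∈ avail ↔ (t ∈ s0 ∧ t ∉ occ)) :
    (pvNewAvail s0 nbrs avail occ req).Nodup := by
  unfold pvNewAvail
  rw [List.nodup_append]
  refine ⟨List.Nodup.filter _ hndav, List.Nodup.filter _ hnd0, ?_⟩
  intro x hx y hy
  rintro rfl
  have hQ : pvQb nbrs occ req x = true := (List.mem_filter.mp hy).2
  have ho : x ∈ occ := pv_qb_mem nbrs occ req x hQ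
  exact ((hAv x).mp (List.mem_filter.mp hx).1).2 ho

lemma pv_newAvail_char (s0 avail occ : List (Int × Int))
    (nbrs : PySem.Dict (Int × Int) (List (Int × Int))) (req : Int)
    (hAv : ∀ t, t ∈ avail ↔ (t ∈ s0 ∧ t ∉ occ)) :
    ∀ t, t ∈ pvNewAvail s0 nbrs avail occ req ↔
      (t ∈ s0 ∧ t ∉ pvNewOcc s0 nbrs occ req) := by
  intro t
  have hAvt := hAv t
  have hPocc := pv_pb_not_mem nbrs occ t
  have hQocc := pv_qb_mem nbrs occ req t
  by_cases hP : pvPb nbrs occ t = true <;> by_cases hQ : pvQb nbrs occ req t = true <;>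
    by_cases hs0 : t ∈ s0 <;> by_cases hocc : t ∈ occ <;>
      simp_all [pvNewAvail, pvNewOcc, List.mem_append, List.mem_filter,
        List.contains_iff_mem]

-- the two loops agree round for round
lemma pv_loopAB (s0 : List (Int × Int)) (maxp : Int × Int) (los : Bool) (req : Int)
    (hnd0 : s0.Nodup) :
    ∀ (fuel : Nat) (avail occ : List (Int × Int)), avail.Nodup → occ.Nodup →
      (∀ t, t ∈ avail ↔ (t ∈ s0 ∧ t ∉ occ)) → (∀ x ∈ occ, x ∈ s0) →
      pvLoopA fuel s0 avail occ maxp los req =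
        pvLoopB fuel s0 ⟨s0.map (fun t => (t, pvNbrsOf s0 maxp los t))⟩ avail occ req := by
  intro fuel
  induction fuel with
  | zero => intro avail occ _ _ _ _; rfl
  | succ fuel ih =>
    intro avail occ hndav hndoc hAv hOcc
    rw [pvLoopA_succ, pvLoopB_succ]
    dsimp only
    rw [pv_roundA_eq s0 avail occ maxp los req hnd0 hndav hndoc hAv hOcc,
      pv_roundB_occ s0 occ ⟨s0.map (fun t => (t, pvNbrsOf s0 maxp los t))⟩ req hnd0,
      pv_roundB_avail s0 avail occ ⟨s0.map (fun t => (t, pvNbrsOf s0 maxp los t))⟩ req hnd0 hAv]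
    by_cases hlen : PySem.List.len (pvNewOcc s0 ⟨s0.map (fun t => (t, pvNbrsOf s0 maxp los t))⟩ occ req) = PySem.List.len occ
    · rw [if_pos hlen, if_pos hlen]
    · rw [if_neg hlen, if_neg hlen]
      exact ih (pvNewAvail s0 ⟨s0.map (fun t => (t, pvNbrsOf s0 maxp los t))⟩ avail occ req)
        (pvNewOcc s0 ⟨s0.map (fun t => (t, pvNbrsOf s0 maxp los t))⟩ occ req)
        (pv_newAvail_nodup s0 avail occ _ req hnd0 hndav hAv)
        (pv_newOcc_nodup s0 occ _ req hnd0 hndoc)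
        (pv_newAvail_char s0 avail occ _ req hAv)
        (pv_newOcc_sub s0 occ _ req hOcc)

-- ===== VERDICT (by name: the statement is the Claim_ definition above) =====
theorem find_stable_state_spec : Claim_equal_find_stable_state := by
  intro seats maxp los req _
  unfold Spec_find_stable_state find_stable_state find_stable_state_alt
  exact pv_loopAB (PySem.Set.ofList seats) maxp los req (PySem.Set.nodup_ofList seats)
    (2 ^ (PySem.Set.ofList seats).length + 2) (PySem.Set.ofList seats) []
    (PySem.Set.nodup_ofList seats) (by simp) (by simp) (by simp)
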